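-- pv_equiv track=rewrite | github.com/sovaz1997/term2048_ai | term2048/ai_solution.py | hole
-- ===== SOURCE A (Python) =====
-- def hole(colrow):
-- 	hole = False
-- 	for i in colrow:
-- 		if i != 0:
-- 			hole = True
-- 		if hole and i == 0:
-- 			return True
-- 	return False
-- ===== SOURCE B (Python) =====
-- def hole(colrow):
--     lst = list(colrow)
--     return any(x != 0 and y == 0 for x, y in zip(lst, lst[1:]))
-- ===== Notes on version B (the rewrite author's own statement) =====
-- stated objective: simpler
-- what changed: Replaced the stateful flag-tracking scan with a stateless test over adjacent pairs: a hole exists iff some neighbouring pair is (nonzero, zero), since the earliest zero after a nonzero is immediately preceded by a nonzero.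
import Mathlib
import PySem

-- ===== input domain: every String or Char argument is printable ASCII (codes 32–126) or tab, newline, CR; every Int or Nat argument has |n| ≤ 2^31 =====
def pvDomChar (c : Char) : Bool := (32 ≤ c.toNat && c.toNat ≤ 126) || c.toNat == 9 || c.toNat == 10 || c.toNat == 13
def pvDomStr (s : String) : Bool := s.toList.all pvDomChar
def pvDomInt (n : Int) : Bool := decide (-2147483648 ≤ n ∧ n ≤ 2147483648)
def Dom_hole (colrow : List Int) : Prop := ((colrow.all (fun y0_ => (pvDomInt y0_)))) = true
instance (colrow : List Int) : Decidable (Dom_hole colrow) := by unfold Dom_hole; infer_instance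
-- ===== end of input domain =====

-- B replaces A's stateful flag scan by a stateless adjacent-pair test: a hole exists iff some
-- neighbouring pair is (nonzero, zero) (the earliest zero after a nonzero is preceded by a nonzero).

-- ===== PORT A =====
-- the flag-tracking loop of A: state is the 'hole' flag
def holeLoop : List Int → Bool → Bool
  | [], _ => false
  | i :: rest, h =>
    let h' := if i ≠ 0 then true else h
    if h' && i == 0 then true else holeLoop rest h'

def hole (colrow : List Int) : Bool := holeLoop colrow false

-- ===== PORT B =====
def hole_alt (colrow : List Int) : Bool :=
  (colrow.zip (colrow.drop 1)).any (fun p => p.1 != 0 && p.2 == 0)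

-- ===== PRECONDITION & SPEC =====
def Spec_hole (colrow : List Int) (out : Bool) : Prop := out = hole_alt colrow
instance (colrow : List Int) (out : Bool) : Decidable (Spec_hole colrow out) := by unfold Spec_hole; infer_instance

-- ===== CLAIM =====
def Claim_equal_hole : Prop := ∀ (colrow : List Int), Dom_hole colrow → Spec_hole colrow (hole colrow)

-- ===== LEMMAS AND PROOFS =====
theorem holeLoop_true (l : List Int) : holeLoop l true = l.contains 0 := by
  induction l with
  | nil => simp [holeLoop]
  | cons i rest ih =>
    by_cases hi : i = 0
    · simp [holeLoop, hi]
    · simp only [holeLoop]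
      simp [ih, hi, Ne.symm hi]

theorem hole_alt_cons_zero (rest : List Int) : hole_alt (0 :: rest) = hole_alt rest := by
  cases rest with
  | nil => simp [hole_alt]
  | cons j r => simp [hole_alt]

theorem hole_alt_cons_ne (l : List Int) : ∀ i : Int, i ≠ 0 → hole_alt (i :: l) = l.contains 0 := by
  induction l with
  | nil => intro i hi; simp [hole_alt]
  | cons j r ih =>
    intro i hi
    by_cases hj : j = 0
    · simp [hole_alt, hj, hi]
    · have hr := ih j hj
      simp only [hole_alt, List.drop_one, List.tail_cons, List.zip_cons_cons, List.any_cons] at hr ⊢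
      have hjb : (j == (0:Int)) = false := by simp [hj]
      simp [hjb, hr, eq_comm, hj]

theorem hole_eq_alt (l : List Int) : hole l = hole_alt l := by
  unfold hole
  induction l with
  | nil => simp [holeLoop, hole_alt]
  | cons i rest ih =>
    by_cases hi : i = 0
    · subst hi
      simpa [holeLoop, hole_alt_cons_zero] using ih
    · simp [holeLoop, hi, holeLoop_true, hole_alt_cons_ne rest i hi]

-- ===== VERDICT =====
theorem hole_spec : Claim_equal_hole := by
  intro colrow _
  unfold Spec_hole
  exact hole_eq_alt colrow
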